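-- pv_equiv track=rewrite | github.com/msugo1/Algorithms | MockExam.py | solution_first
-- ===== SOURCE A (Python) =====
-- def solution_first(answers):
--     first_student_pattern = [1, 2, 3, 4, 5]
--     second_student_pattern = [2, 1, 2, 3, 2, 4, 2, 5]
--     third_student_pattern = [3, 3, 1, 1, 2, 2, 4, 4, 5, 5]
--
--     first_student_answers_count = 0
--     second_student_answers_count = 0
--     third_student_answers_count = 0
--
--     for index in range(len(answers)):
--         if first_student_pattern[index % len(first_student_pattern)] == answers[index]:
--             first_student_answers_count += 1
--         if second_student_pattern[index % len(second_student_pattern)] == answers[index]: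
--             second_student_answers_count += 1
--         if third_student_pattern[index % len(third_student_pattern)] == answers[index]:
--             third_student_answers_count += 1
--
--     max_answers_count = max(first_student_answers_count, second_student_answers_count, third_student_answers_count)
--
--     answer = []
--     if first_student_answers_count == max_answers_count:
--         answer.append(1)
--     if second_student_answers_count == max_answers_count:
--         answer.append(2)
--     if third_student_answers_count == max_answers_count:
--         answer.append(3)
--
--     return answer
-- ===== SOURCE B (Python) =====
-- def solution_first(answers):
--     # Residue-class aggregation: the three cyclic patterns have period lcm(5,8,10)=40,
--     # so aggregate the answers once into a counter keyed by (index mod 40, answer),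
--     # then read each student's score off the 40-entry table.
--     P = 40
--     keys = [(i % P, a) for i, a in enumerate(answers)]
--     cnt = {}
--     for k in keys:
--         cnt[k] = cnt.get(k, 0) + 1
--     patterns = [
--         [1, 2, 3, 4, 5],
--         [2, 1, 2, 3, 2, 4, 2, 5],
--         [3, 3, 1, 1, 2, 2, 4, 4, 5, 5],
--     ]
--     scores = [sum(cnt.get((r, pat[r % len(pat)]), 0) for r in range(P))
--               for pat in patterns]
--     m = max(scores)
--     return [i + 1 for i, s in enumerate(scores) if s == m]
-- ===== Notes on version B (the rewrite author's own statement) =====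
-- stated objective: alternative
-- what changed: Replaces A's per-index scan testing each of the three cyclic patterns by residue-class aggregation: answers are folded once into a counter keyed by (index mod 40, answer) (40 = lcm of the pattern lengths), and each student's score is read off as a 40-term sum of counter lookups at (r, pattern[r mod len]).
import Mathlib
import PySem

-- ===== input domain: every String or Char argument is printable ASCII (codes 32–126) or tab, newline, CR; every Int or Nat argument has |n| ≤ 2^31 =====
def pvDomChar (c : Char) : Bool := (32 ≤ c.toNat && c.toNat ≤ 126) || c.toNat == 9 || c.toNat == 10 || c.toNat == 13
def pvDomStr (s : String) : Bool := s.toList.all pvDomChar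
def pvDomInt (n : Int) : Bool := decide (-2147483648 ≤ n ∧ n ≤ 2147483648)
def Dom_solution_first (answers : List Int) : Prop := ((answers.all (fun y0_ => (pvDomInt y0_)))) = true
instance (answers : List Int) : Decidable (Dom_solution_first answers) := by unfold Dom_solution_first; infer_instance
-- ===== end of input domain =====

-- B replaces A's single per-index scan with three parallel pattern counters by
-- residue-class aggregation: a counter keyed by (index mod 40, answer) built once,
-- each score then read off as a 40-term sum of counter lookups (objective: alternative).

-- ===== PORT A =====
-- A's counting loop: for index in range(len(answers)) with three parallel counters.
-- pattern[index % len(pattern)] and answers[index] are always in range, so pyGetD 0 is exact.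
def pvALoop (answers : List Int) : Int × Int × Int :=
  (PySem.List.pyRange 0 (PySem.List.len answers) 1).foldl
    (fun (c : Int × Int × Int) (index : Int) =>
      (if PySem.List.pyGetD [1, 2, 3, 4, 5] (PySem.Int.mod index (PySem.List.len ([1, 2, 3, 4, 5] : List Int))) 0 == PySem.List.pyGetD answers index 0 then c.1 + 1 else c.1,
       if PySem.List.pyGetD [2, 1, 2, 3, 2, 4, 2, 5] (PySem.Int.mod index (PySem.List.len ([2, 1, 2, 3, 2, 4, 2, 5] : List Int))) 0 == PySem.List.pyGetD answers index 0 then c.2.1 + 1 else c.2.1,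
       if PySem.List.pyGetD [3, 3, 1, 1, 2, 2, 4, 4, 5, 5] (PySem.Int.mod index (PySem.List.len ([3, 3, 1, 1, 2, 2, 4, 4, 5, 5] : List Int))) 0 == PySem.List.pyGetD answers index 0 then c.2.2 + 1 else c.2.2))
    ((0, 0, 0) : Int × Int × Int)

def solution_first (answers : List Int) : List Int :=
  let cs := pvALoop answers
  let m := max (max cs.1 cs.2.1) cs.2.2
  let answer : List Int := []
  let answer := if cs.1 == m then answer ++ [1] else answer
  let answer := if cs.2.1 == m then answer ++ [2] else answer
  let answer := if cs.2.2 == m then answer ++ [3] else answer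
  answer

-- ===== PORT B =====
-- keys = [(i % 40, a) for i, a in enumerate(answers)]
def pvKeys (answers : List Int) : List (Int × Int) :=
  (PySem.List.enumerate answers 0).map (fun p => (PySem.Int.mod p.1 40, p.2))

-- cnt[k] = cnt.get(k, 0) + 1 over keys
def pvCnt (answers : List Int) : PySem.Dict (Int × Int) Int :=
  (pvKeys answers).foldl (fun d k => d.insert k (d.getD k 0 + 1)) PySem.Dict.empty

-- sum(cnt.get((r, pat[r % len(pat)]), 0) for r in range(40))
def pvScoreB (cnt : PySem.Dict (Int × Int) Int) (pat : List Int) : Int :=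
  ((PySem.List.pyRange 0 40 1).map
    (fun r => cnt.getD (r, PySem.List.pyGetD pat (PySem.Int.mod r (PySem.List.len pat)) 0) 0)).sum

def solution_first_alt (answers : List Int) : List Int :=
  let cnt := pvCnt answers
  let patterns : List (List Int) :=
    [[1, 2, 3, 4, 5], [2, 1, 2, 3, 2, 4, 2, 5], [3, 3, 1, 1, 2, 2, 4, 4, 5, 5]]
  let scores := patterns.map (fun pat => pvScoreB cnt pat)
  let m := (PySem.List.max? scores (fun s => s)).getD 0   -- max(scores); scores is nonempty
  ((PySem.List.enumerate scores 0).filter (fun p => p.2 == m)).map (fun p => p.1 + 1)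

-- ===== PRECONDITION & SPEC =====
def Spec_solution_first (answers : List Int) (out : List Int) : Prop := out = solution_first_alt answers
instance (answers : List Int) (out : List Int) : Decidable (Spec_solution_first answers out) := by unfold Spec_solution_first; infer_instance

-- ===== CLAIM (what is proved, stated in full; the proofs are below) =====
def Claim_equal_solution_first : Prop := ∀ (answers : List Int), Dom_solution_first answers → Spec_solution_first answers (solution_first answers)

-- ===== LEMMAS AND PROOFS =====

-- a fold over range(len(xs)) whose body reads xs[j] is a fold over enumerate(xs)
theorem pvFold_range_enum {σ : Type} (F : σ → Int → Int → σ) (xs : List Int) (init : σ) :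
    (PySem.List.pyRange 0 (PySem.List.len xs) 1).foldl
      (fun c j => F c j (PySem.List.pyGetD xs j 0)) init
    = (PySem.List.enumerate xs 0).foldl (fun c p => F c p.1 p.2) init := by
  rw [PySem.List.enumerate_eq_map_pyRange (d := 0), List.foldl_map]

-- A's single fold computes the triple of three per-pattern folds.
theorem pvLoop_eq (p1 p2 p3 : List Int) (xs : List Int) :
    ∀ (s c1 c2 c3 : Int),
    (PySem.List.enumerate xs s).foldl
      (fun (c : Int × Int × Int) (p : Int × Int) =>
        (if PySem.List.pyGetD p1 (PySem.Int.mod p.1 (PySem.List.len p1)) 0 == p.2 then c.1 + 1 else c.1,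
         if PySem.List.pyGetD p2 (PySem.Int.mod p.1 (PySem.List.len p2)) 0 == p.2 then c.2.1 + 1 else c.2.1,
         if PySem.List.pyGetD p3 (PySem.Int.mod p.1 (PySem.List.len p3)) 0 == p.2 then c.2.2 + 1 else c.2.2))
      (c1, c2, c3)
    = ((PySem.List.enumerate xs s).foldl
        (fun acc p => if PySem.List.pyGetD p1 (PySem.Int.mod p.1 (PySem.List.len p1)) 0 == p.2 then acc + 1 else acc) c1,
       (PySem.List.enumerate xs s).foldl
        (fun acc p => if PySem.List.pyGetD p2 (PySem.Int.mod p.1 (PySem.List.len p2)) 0 == p.2 then acc + 1 else acc) c2,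
       (PySem.List.enumerate xs s).foldl
        (fun acc p => if PySem.List.pyGetD p3 (PySem.Int.mod p.1 (PySem.List.len p3)) 0 == p.2 then acc + 1 else acc) c3) := by
  induction xs with
  | nil => intro s c1 c2 c3; simp [PySem.List.enumerate_nil]
  | cons x t ih =>
    intro s c1 c2 c3
    simp only [PySem.List.enumerate_cons, List.foldl_cons]
    split_ifs <;> exact ih (s + 1) _ _ _

-- A's per-pattern count, as a countP over enumerate(xs)
def pvACount (pat : List Int) (xs : List Int) : Int :=
  (PySem.List.enumerate xs 0).foldl
    (fun acc p => if PySem.List.pyGetD pat (PySem.Int.mod p.1 (PySem.List.len pat)) 0 == p.2 then acc + 1 else acc) 0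

theorem pvALoop_eq (xs : List Int) :
    pvALoop xs = (pvACount [1, 2, 3, 4, 5] xs, pvACount [2, 1, 2, 3, 2, 4, 2, 5] xs,
                  pvACount [3, 3, 1, 1, 2, 2, 4, 4, 5, 5] xs) := by
  have h1 : pvALoop xs
      = (PySem.List.enumerate xs 0).foldl
          (fun (c : Int × Int × Int) (p : Int × Int) =>
            (if PySem.List.pyGetD [1, 2, 3, 4, 5] (PySem.Int.mod p.1 (PySem.List.len ([1, 2, 3, 4, 5] : List Int))) 0 == p.2 then c.1 + 1 else c.1,
             if PySem.List.pyGetD [2, 1, 2, 3, 2, 4, 2, 5] (PySem.Int.mod p.1 (PySem.List.len ([2, 1, 2, 3, 2, 4, 2, 5] : List Int))) 0 == p.2 then c.2.1 + 1 else c.2.1,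
             if PySem.List.pyGetD [3, 3, 1, 1, 2, 2, 4, 4, 5, 5] (PySem.Int.mod p.1 (PySem.List.len ([3, 3, 1, 1, 2, 2, 4, 4, 5, 5] : List Int))) 0 == p.2 then c.2.2 + 1 else c.2.2))
          ((0, 0, 0) : Int × Int × Int) :=
    pvFold_range_enum
      (fun c j a =>
        (if PySem.List.pyGetD [1, 2, 3, 4, 5] (PySem.Int.mod j (PySem.List.len ([1, 2, 3, 4, 5] : List Int))) 0 == a then c.1 + 1 else c.1,
         if PySem.List.pyGetD [2, 1, 2, 3, 2, 4, 2, 5] (PySem.Int.mod j (PySem.List.len ([2, 1, 2, 3, 2, 4, 2, 5] : List Int))) 0 == a then c.2.1 + 1 else c.2.1,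
         if PySem.List.pyGetD [3, 3, 1, 1, 2, 2, 4, 4, 5, 5] (PySem.Int.mod j (PySem.List.len ([3, 3, 1, 1, 2, 2, 4, 4, 5, 5] : List Int))) 0 == a then c.2.2 + 1 else c.2.2))
      xs ((0, 0, 0) : Int × Int × Int)
  rw [h1, pvLoop_eq]
  rfl

theorem pvACount_eq_countP (pat xs : List Int) :
    pvACount pat xs
    = ((PySem.List.enumerate xs 0).countP
        (fun p => PySem.List.pyGetD pat (PySem.Int.mod p.1 (PySem.List.len pat)) 0 == p.2) : Int) := by
  unfold pvACount
  rw [PySem.List.foldl_if_add_one]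
  simp

-- Σ_{r ∈ rs} [x = (r, f r)] vanishes when x.1 ∉ rs
theorem pvSum_ite_zero (x : Int × Int) (f : Int → Int) (rs : List Int) (h : x.1 ∉ rs) :
    (rs.map (fun r => if x = (r, f r) then (1 : Int) else 0)).sum = 0 := by
  induction rs with
  | nil => simp
  | cons s t ih =>
    simp only [List.mem_cons, not_or] at h
    have hx : ¬ x = (s, f s) := by
      intro he; exact h.1 (by rw [he])
    simp only [List.map_cons, List.sum_cons, if_neg hx, zero_add]
    exact ih h.2

-- Σ_{r ∈ rs} [x = (r, f r)] = [f x.1 = x.2] when x.1 occurs exactly once in rs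
theorem pvSum_ite_single (x : Int × Int) (f : Int → Int) (rs : List Int)
    (hm : x.1 ∈ rs) (hn : rs.Nodup) :
    (rs.map (fun r => if x = (r, f r) then (1 : Int) else 0)).sum
    = if f x.1 == x.2 then 1 else 0 := by
  induction rs with
  | nil => simp at hm
  | cons s t ih =>
    simp only [List.map_cons, List.sum_cons]
    rcases List.mem_cons.mp hm with h1 | h2
    · have hz : (t.map (fun r => if x = (r, f r) then (1 : Int) else 0)).sum = 0 :=
        pvSum_ite_zero x f t (by rw [h1]; exact (List.nodup_cons.mp hn).1)
      rw [hz, add_zero]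
      subst h1
      by_cases he : f x.1 = x.2
      · rw [if_pos (by rw [Prod.ext_iff]; exact ⟨rfl, he.symm⟩), if_pos (by simp [he])]
      · rw [if_neg (fun hc => he (congrArg Prod.snd hc).symm), if_neg (by simp [he])]
    · have hs : ¬ x = (s, f s) := by
        intro he
        have h1 : x.1 = s := by rw [he]
        exact (List.nodup_cons.mp hn).1 (h1 ▸ h2)
      rw [if_neg hs, zero_add]
      exact ih h2 (List.nodup_cons.mp hn).2

-- residue-class aggregation: summing per-key counts over a nodup key list is a countP
theorem pvSum_count_eq_countP (f : Int → Int) (rs : List Int) (hn : rs.Nodup) :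
    ∀ (L : List (Int × Int)), (∀ p ∈ L, p.1 ∈ rs) →
    (rs.map (fun r => ((L.count (r, f r) : Nat) : Int))).sum
    = (L.countP (fun p => f p.1 == p.2) : Int) := by
  intro L
  induction L with
  | nil => intro _; simp
  | cons x t ih =>
    intro hmem
    have hstep : (rs.map (fun r => (((x :: t).count (r, f r) : Nat) : Int))).sum
        = (rs.map (fun r => ((t.count (r, f r) : Nat) : Int)
            + (if x = (r, f r) then (1 : Int) else 0))).sum := by
      apply congrArg
      apply List.map_congr_left
      intro r _
      rw [List.count_cons]
      by_cases he : x = (r, f r)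
      · rw [if_pos (by simp [he]), if_pos he]; push_cast; ring
      · rw [if_neg (by simp [he]), if_neg he]; push_cast; ring
    rw [hstep, PySem.List.sum_map_add_int,
      ih (fun p hp => hmem p (List.mem_cons_of_mem x hp)),
      pvSum_ite_single x f rs (hmem x (List.mem_cons_self)) hn,
      List.countP_cons]
    by_cases hb : f x.1 == x.2
    · simp only [hb, if_pos]; push_cast; ring
    · simp only [hb]; push_cast; simp

-- B's score for a pattern whose length divides 40 is the same countP A computes
theorem pvScoreB_eq (xs pat : List Int) (h0 : 0 < PySem.List.len pat)
    (hd : PySem.List.len pat ∣ 40) :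
    pvScoreB (pvCnt xs) pat
    = ((PySem.List.enumerate xs 0).countP
        (fun p => PySem.List.pyGetD pat (PySem.Int.mod p.1 (PySem.List.len pat)) 0 == p.2) : Int) := by
  unfold pvScoreB pvCnt
  have hget : ∀ (k : Int × Int),
      ((pvKeys xs).foldl (fun d k => d.insert k (d.getD k 0 + 1)) PySem.Dict.empty).getD k 0
      = ((pvKeys xs).count k : Int) := by
    intro k
    rw [PySem.Dict.getD_foldl_insert_add_one, PySem.Dict.getD_empty, zero_add]
  have hmap : (PySem.List.pyRange 0 40 1).map
      (fun r => ((pvKeys xs).foldl (fun d k => d.insert k (d.getD k 0 + 1)) PySem.Dict.empty).getD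
        (r, PySem.List.pyGetD pat (PySem.Int.mod r (PySem.List.len pat)) 0) 0)
      = (PySem.List.pyRange 0 40 1).map
        (fun r => (((pvKeys xs).count (r, PySem.List.pyGetD pat (PySem.Int.mod r (PySem.List.len pat)) 0) : Nat) : Int)) := by
    apply List.map_congr_left
    intro r _
    exact hget _
  rw [hmap, pvSum_count_eq_countP _ _ (by decide) _ ?_]
  · -- countP over the mapped key list = the countP A computes
    unfold pvKeys
    rw [List.countP_map]
    apply congrArg
    apply List.countP_congr
    intro p _
    simp only [Function.comp_apply]
    have hm : PySem.Int.mod (PySem.Int.mod p.1 40) (PySem.List.len pat)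
        = PySem.Int.mod p.1 (PySem.List.len pat) := by
      simp only [PySem.Int.mod_eq_emod_of_pos h0,
        PySem.Int.mod_eq_emod_of_pos (show (0:Int) < 40 by norm_num)]
      exact Int.emod_emod_of_dvd _ hd
    rw [hm]
  · -- every key's first component lies in range(40)
    intro p hp
    unfold pvKeys at hp
    rcases List.mem_map.mp hp with ⟨q, _, hq⟩
    rw [← hq]
    rw [PySem.List.mem_pyRange_one]
    constructor
    · exact PySem.Int.mod_nonneg q.1 (by norm_num)
    · exact PySem.Int.mod_lt q.1 (by norm_num)

theorem pvMax3 (a b c : Int) :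
    (PySem.List.max? [a, b, c] (fun s => s)).getD 0 = max (max a b) c := by
  rw [PySem.List.max?_id_cons]
  rfl

theorem solution_first_eq (answers : List Int) :
    solution_first answers = solution_first_alt answers := by
  unfold solution_first solution_first_alt
  rw [pvALoop_eq]
  simp only [List.map_cons, List.map_nil]
  rw [pvScoreB_eq answers [1, 2, 3, 4, 5] (by decide) (by decide),
    pvScoreB_eq answers [2, 1, 2, 3, 2, 4, 2, 5] (by decide) (by decide),
    pvScoreB_eq answers [3, 3, 1, 1, 2, 2, 4, 4, 5, 5] (by decide) (by decide),
    ← pvACount_eq_countP, ← pvACount_eq_countP, ← pvACount_eq_countP]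
  rw [pvMax3]
  generalize pvACount [1, 2, 3, 4, 5] answers = s1
  generalize pvACount [2, 1, 2, 3, 2, 4, 2, 5] answers = s2
  generalize pvACount [3, 3, 1, 1, 2, 2, 4, 4, 5, 5] answers = s3
  simp only [PySem.List.enumerate_cons, PySem.List.enumerate_nil, List.filter_cons, List.filter_nil]
  split_ifs <;> norm_num

-- ===== VERDICT (by name: the statement is the Claim_ definition above) =====
theorem solution_first_spec : Claim_equal_solution_first := by
  intro answers _
  unfold Spec_solution_first
  exact solution_first_eq answers
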